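-- pv_equiv track=rewrite | github.com/PauSolerValades/AoC2023 | day1/part1.py | search_first_last_number
-- ===== SOURCE A (Python) =====
-- def search_first_last_number(paraula):
--
--     for lletra in paraula:
--         if lletra.isnumeric():
--             first_number = lletra
--             break
--
--     for lletra in paraula[::-1]:
--         if lletra.isnumeric():
--             last_number = lletra
--             break
--
--     return int(first_number + last_number)
-- ===== SOURCE B (Python) =====
-- def search_first_last_number(paraula):
--     digits = [c for c in paraula if c.isnumeric()]
--     return int(digits[0] + digits[-1])
-- ===== Notes on version B (the rewrite author's own statement) =====
-- stated objective: simpler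
-- what changed: B replaces A's two directional scans with break (forward, then over the reversed string) by one comprehension collecting all digit characters and indexing digits[0]/digits[-1].
import Mathlib
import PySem

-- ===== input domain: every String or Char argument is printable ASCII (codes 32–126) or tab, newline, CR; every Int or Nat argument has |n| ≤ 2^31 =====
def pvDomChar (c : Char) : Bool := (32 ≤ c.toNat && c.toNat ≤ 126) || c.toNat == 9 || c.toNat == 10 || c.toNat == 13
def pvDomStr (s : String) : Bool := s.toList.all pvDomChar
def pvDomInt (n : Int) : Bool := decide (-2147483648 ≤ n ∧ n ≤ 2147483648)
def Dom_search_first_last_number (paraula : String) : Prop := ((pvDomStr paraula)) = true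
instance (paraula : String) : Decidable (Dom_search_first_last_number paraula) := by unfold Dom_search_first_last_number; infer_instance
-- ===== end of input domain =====

-- B collects the digit characters in one comprehension and indexes digits[0]/digits[-1], replacing
-- A's two directional scans with break; objective: simpler. (On ASCII input, str.isnumeric = isdigit.)

-- ===== PORT A =====
-- two scans: first digit forward, first digit of paraula[::-1]; then int(first + last).
-- '.isnumeric()' is ported as PySem.Chars.isdigit: exact on the printable-ASCII domain.
def search_first_last_number (paraula : String) : Int :=
  match paraula.toList.find? (fun c => PySem.Chars.isdigit c) with
  | none => 0  -- Python raises UnboundLocalError here; excluded by Pre_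
  | some first_number =>
    match ((PySem.List.slice? paraula.toList none none (-1)).getD []).find?
            (fun c => PySem.Chars.isdigit c) with
    | none => 0  -- unreachable when the first scan found a digit
    | some last_number => (PySem.Int.ofChars? [first_number, last_number]).getD 0
      -- int(first+last): ofChars? is some here since both chars are digits; excluded by Pre_ otherwise

-- ===== PORT B =====
def search_first_last_number_alt (paraula : String) : Int :=
  let digits := paraula.toList.filter (fun c => PySem.Chars.isdigit c)
  match PySem.List.pyGet? digits 0, PySem.List.pyGet? digits (-1) with
  | some a, some b => (PySem.Int.ofChars? [a, b]).getD 0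
  | _, _ => 0  -- Python raises IndexError here (no digits); excluded by Pre_

-- ===== PRECONDITION & SPEC =====
-- Pre_ excludes strings with no digit character: A raises UnboundLocalError there (B raises IndexError).
def Pre_search_first_last_number (paraula : String) : Prop :=
  paraula.toList.any (fun c => PySem.Chars.isdigit c) = true
instance (paraula : String) : Decidable (Pre_search_first_last_number paraula) := by
  unfold Pre_search_first_last_number; infer_instance
def pvWitness_search_first_last_number : String := "a1b2"

def Spec_search_first_last_number (paraula : String) (out : Int) : Prop := out = search_first_last_number_alt paraula
instance (paraula : String) (out : Int) : Decidable (Spec_search_first_last_number paraula out) := by unfold Spec_search_first_last_number; infer_instance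

-- ===== CLAIM (what is proved, stated in full; the proofs are below) =====
def Claim_equal_search_first_last_number : Prop := ∀ (paraula : String), Dom_search_first_last_number paraula → Pre_search_first_last_number paraula → Spec_search_first_last_number paraula (search_first_last_number paraula)

-- ===== LEMMAS AND PROOFS =====

theorem search_first_last_number_agree (paraula : String)
    (h : Pre_search_first_last_number paraula) :
    search_first_last_number paraula = search_first_last_number_alt paraula := by
  unfold Pre_search_first_last_number at h
  unfold search_first_last_number search_first_last_number_alt
  rw [PySem.List.slice?_none_none_neg_one]
  simp only [Option.getD_some]
  rw [← List.head?_filter, ← List.head?_filter, List.filter_reverse, List.head?_reverse,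
      PySem.List.pyGet?_zero, PySem.List.pyGet?_neg_one]
  have hne : paraula.toList.filter (fun c => PySem.Chars.isdigit c) ≠ [] := by
    simp only [List.any_eq_true] at h
    obtain ⟨c, hc, hd⟩ := h
    simp only [ne_eq, List.filter_eq_nil_iff, not_forall]
    exact ⟨c, hc, by simp [hd]⟩
  obtain ⟨d, ds, hds⟩ := List.exists_cons_of_ne_nil hne
  simp [hds, List.getLast?_eq_some_getLast]

-- ===== VERDICT (by name: the statement is the Claim_ definition above) =====
theorem search_first_last_number_spec : Claim_equal_search_first_last_number := by
  intro paraula _ hpre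
  unfold Spec_search_first_last_number
  exact (search_first_last_number_agree paraula hpre)
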